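-- pv_equiv track=rewrite | github.com/daniskazan/ozon_tech_sandbox | network_possible_friends.py | recommend_friends
-- ===== SOURCE A (Python) =====
-- from collections import defaultdict
-- from typing import List, Tuple
--
-- def recommend_friends(n: int, friendships: List[Tuple], user: int):
--     """
--     :param n the number of users in the network.
--     :param friendships: a list of tuples representing the friendship relationships between users.
--     :param user: the id of the user for whom the list of possible friends needs to be calculated.
--     """
--     graph = defaultdict(list)
--
--     for x, y in friendships:
--         graph[x].append(y)
--         graph[y].append(x)
--
--     possible_friends = []
--     max_mutual_friends = -1
--     for i in range(1, n+1):
--         if len(possible_friends) > 5: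
--             continue
--         if i == user or i in graph[user]:
--             continue
--
--         mutual_friends = len(set(graph[user]).intersection(set(graph[i])))
--         if mutual_friends and mutual_friends > max_mutual_friends:
--             max_mutual_friends = mutual_friends
--             possible_friends = [i]
--         elif mutual_friends == max_mutual_friends:
--             possible_friends.append(i)
--     return possible_friends
-- ===== SOURCE B (Python) =====
-- from collections import defaultdict, Counter
-- from typing import List, Tuple
--
-- def recommend_friends(n: int, friendships: List[Tuple], user: int):
--     # Friend-of-friend traversal: count mutual friends only for reachable
--     # candidates, then replay the ascending selection over those candidates.
--     adj = defaultdict(set)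
--     for x, y in friendships:
--         adj[x].add(y)
--         adj[y].add(x)
--
--     uf = adj[user]
--     cnt = Counter(g for f in uf for g in adj[f] if g != user and g not in uf)
--
--     possible_friends = []
--     max_mutual_friends = -1
--     for c in sorted(c for c in cnt if 1 <= c <= n):
--         if len(possible_friends) > 5:
--             continue
--         m = cnt[c]
--         if m > max_mutual_friends:
--             max_mutual_friends = m
--             possible_friends = [c]
--         elif m == max_mutual_friends:
--             possible_friends.append(c)
--     return possible_friends
-- ===== Notes on version B (the rewrite author's own statement) =====
-- stated objective: faster
-- what changed: A scans every user 1..n and rebuilds set(graph[user]) plus a set intersection per user; B builds set adjacency once, counts mutual friends with a Counter over the friend-of-friend stream (only reachable candidates), and replays A's ascending selection over the sorted positive-count candidates.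
import Mathlib
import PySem

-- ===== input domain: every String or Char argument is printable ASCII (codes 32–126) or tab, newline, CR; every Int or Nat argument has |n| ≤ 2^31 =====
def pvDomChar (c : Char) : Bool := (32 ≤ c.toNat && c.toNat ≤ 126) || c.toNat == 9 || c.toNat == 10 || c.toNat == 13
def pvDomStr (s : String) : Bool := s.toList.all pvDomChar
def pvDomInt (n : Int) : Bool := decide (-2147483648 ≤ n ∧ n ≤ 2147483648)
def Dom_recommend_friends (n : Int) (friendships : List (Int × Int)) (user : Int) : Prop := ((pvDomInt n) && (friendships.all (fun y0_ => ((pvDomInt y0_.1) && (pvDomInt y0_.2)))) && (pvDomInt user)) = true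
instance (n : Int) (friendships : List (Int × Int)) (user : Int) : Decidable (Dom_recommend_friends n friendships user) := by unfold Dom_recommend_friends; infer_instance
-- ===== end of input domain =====

-- B replaces A's scan of all n users (each recomputing set(graph[user]) and an
-- intersection) by a friend-of-friend Counter over reachable candidates only,
-- then replays the ascending selection over the sorted positive-count candidates.

-- ===== PORT A =====
-- graph[x].append(y); graph[y].append(x)  (defaultdict(list))
def pvStepGraphA (d : PySem.Dict Int (List Int)) (p : Int × Int) : PySem.Dict Int (List Int) :=
  (d.modify p.1 [] (fun l => l ++ [p.2])).modify p.2 [] (fun l => l ++ [p.1])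

-- the body of A's selection loop over i = 1..n (mu i = len(set(graph[user]) & set(graph[i])))
def pvSelectA (user : Int) (gU : List Int) (mu : Int → Int)
    (st : List Int × Int) (i : Int) : List Int × Int :=
  if st.1.length > 5 then st
  else if i = user ∨ i ∈ gU then st
  else if mu i ≠ 0 ∧ st.2 < mu i then ([i], mu i)
  else if mu i = st.2 then (st.1 ++ [i], st.2)
  else st

def recommend_friends (n : Int) (friendships : List (Int × Int)) (user : Int) : List Int :=
  let graph := friendships.foldl pvStepGraphA PySem.Dict.empty
  ((PySem.List.pyRange 1 (n+1)).foldl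
    (pvSelectA user (graph.getD user [])
      (fun i => PySem.Set.len ((PySem.Set.ofList (graph.getD user [])).inter
                                (PySem.Set.ofList (graph.getD i [])))))
    ([], -1)).1

-- ===== PORT B =====
-- adj[x].add(y); adj[y].add(x)  (defaultdict(set))
def pvStepAdjB (d : PySem.Dict Int (PySem.Set Int)) (p : Int × Int) : PySem.Dict Int (PySem.Set Int) :=
  (d.modify p.1 PySem.Set.empty (fun s => s.add p.2)).modify p.2 PySem.Set.empty (fun s => s.add p.1)

-- the body of B's selection loop over the sorted candidates (m c = cnt[c])
def pvSelectB (m : Int → Int) (st : List Int × Int) (c : Int) : List Int × Int :=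
  if st.1.length > 5 then st
  else if st.2 < m c then ([c], m c)
  else if m c = st.2 then (st.1 ++ [c], st.2)
  else st

def recommend_friends_alt (n : Int) (friendships : List (Int × Int)) (user : Int) : List Int :=
  let adj := friendships.foldl pvStepAdjB PySem.Dict.empty
  let uf := adj.getD user PySem.Set.empty
  let cnt := PySem.Dict.counter
    (uf.foldl (fun acc f => acc ++ (adj.getD f PySem.Set.empty).filter
        (fun g => decide (¬ g = user ∧ ¬ g ∈ uf))) [])
  let cands := PySem.List.sorted (cnt.keys.filter (fun c => decide (1 ≤ c ∧ c ≤ n))) (fun x => x)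
  (cands.foldl (pvSelectB (fun c => cnt.getD c 0)) ([], -1)).1

-- ===== PRECONDITION & SPEC =====
def Spec_recommend_friends (n : Int) (friendships : List (Int × Int)) (user : Int) (out : List Int) : Prop := out = recommend_friends_alt n friendships user
instance (n : Int) (friendships : List (Int × Int)) (user : Int) (out : List Int) : Decidable (Spec_recommend_friends n friendships user out) := by unfold Spec_recommend_friends; infer_instance

-- ===== CLAIM (what is proved, stated in full; the proofs are below) =====
def Claim_equal_recommend_friends : Prop := ∀ (n : Int) (friendships : List (Int × Int)) (user : Int), Dom_recommend_friends n friendships user → Spec_recommend_friends n friendships user (recommend_friends n friendships user)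

-- ===== LEMMAS AND PROOFS =====

lemma mem_stepGraphA (d : PySem.Dict Int (List Int)) (p : Int × Int) (x y : Int) :
    y ∈ (pvStepGraphA d p).getD x [] ↔
      y ∈ d.getD x [] ∨ (x = p.1 ∧ y = p.2) ∨ (x = p.2 ∧ y = p.1) := by
  unfold pvStepGraphA
  simp only [PySem.Dict.modify, PySem.Dict.getD_insert]
  split_ifs with h1 h2 <;> simp_all [List.mem_append]

lemma mem_graphA (fs : List (Int × Int)) (d : PySem.Dict Int (List Int)) (x y : Int) :
    y ∈ (fs.foldl pvStepGraphA d).getD x [] ↔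
      y ∈ d.getD x [] ∨ (x, y) ∈ fs ∨ (y, x) ∈ fs := by
  induction fs generalizing d with
  | nil => simp
  | cons p t ih =>
    simp only [List.foldl_cons, ih, mem_stepGraphA, List.mem_cons, Prod.ext_iff]
    tauto

lemma mem_stepAdjB (d : PySem.Dict Int (PySem.Set Int)) (p : Int × Int) (x y : Int) :
    y ∈ (pvStepAdjB d p).getD x PySem.Set.empty ↔
      y ∈ d.getD x PySem.Set.empty ∨ (x = p.1 ∧ y = p.2) ∨ (x = p.2 ∧ y = p.1) := by
  unfold pvStepAdjB
  simp only [PySem.Dict.modify, PySem.Dict.getD_insert]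
  split_ifs with h1 h2 <;> simp_all [PySem.Set.mem_add]

lemma mem_adjB (fs : List (Int × Int)) (d : PySem.Dict Int (PySem.Set Int)) (x y : Int) :
    y ∈ (fs.foldl pvStepAdjB d).getD x PySem.Set.empty ↔
      y ∈ d.getD x PySem.Set.empty ∨ (x, y) ∈ fs ∨ (y, x) ∈ fs := by
  induction fs generalizing d with
  | nil => simp
  | cons p t ih =>
    simp only [List.foldl_cons, ih, mem_stepAdjB, List.mem_cons, Prod.ext_iff]
    tauto

lemma nodup_adjB (fs : List (Int × Int)) (d : PySem.Dict Int (PySem.Set Int))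
    (h : ∀ x, (d.getD x PySem.Set.empty).Nodup) (x : Int) :
    ((fs.foldl pvStepAdjB d).getD x PySem.Set.empty).Nodup := by
  induction fs generalizing d with
  | nil => exact h x
  | cons p t ih =>
    refine ih _ (fun z => ?_)
    unfold pvStepAdjB
    simp only [PySem.Dict.modify, PySem.Dict.getD_insert]
    split_ifs <;> (repeat' apply PySem.Set.nodup_add) <;> exact h _

-- count of a candidate in the friend-of-friend stream = a count over the friends of user
lemma count_fof (AD : PySem.Dict Int (PySem.Set Int)) (user c : Int)
    (hnd : ∀ f, (AD.getD f PySem.Set.empty).Nodup)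
    (uf' : List Int) (hcu : ¬ c = user) (hcf : c ∉ AD.getD user PySem.Set.empty) :
    List.count c (uf'.flatMap (fun f => (AD.getD f PySem.Set.empty).filter
        (fun g => decide (¬ g = user ∧ ¬ g ∈ AD.getD user PySem.Set.empty))))
      = uf'.countP (fun f => decide (c ∈ AD.getD f PySem.Set.empty)) := by
  induction uf' with
  | nil => rfl
  | cons f t ih =>
    rw [List.flatMap_cons, List.count_append, ih, List.countP_cons]
    have h1 : List.count c ((AD.getD f PySem.Set.empty).filter
        (fun g => decide (¬ g = user ∧ ¬ g ∈ AD.getD user PySem.Set.empty)))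
        = List.count c (AD.getD f PySem.Set.empty) :=
      List.count_filter (by simp only [decide_eq_true_eq]; exact ⟨hcu, hcf⟩)
    by_cases hm : c ∈ AD.getD f PySem.Set.empty
    · have h2 : List.count c (AD.getD f PySem.Set.empty) = 1 := by
        have h3 := (List.nodup_iff_count_le_one.mp (hnd f)) c
        have h4 := List.count_pos_iff.mpr hm
        omega
      rw [h1, h2, decide_eq_true hm, if_pos rfl]
      omega
    · rw [h1, List.count_eq_zero_of_not_mem hm, decide_eq_false hm,
        if_neg (by simp)]
      omega

-- A's loop over 1..n only changes state at candidate users, given the loop invariant on max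
lemma foldl_selectA_restrict (user : Int) (gU : List Int) (mu : Int → Int)
    (hmu : ∀ i, 0 ≤ mu i) (l : List Int) (st : List Int × Int)
    (hst : st.2 = -1 ∨ 0 < st.2) :
    l.foldl (pvSelectA user gU mu) st
      = (l.filter (fun i => decide (¬ i = user ∧ i ∉ gU ∧ mu i ≠ 0))).foldl
          (pvSelectA user gU mu) st := by
  induction l generalizing st with
  | nil => rfl
  | cons i t ih =>
    by_cases hc : ¬ i = user ∧ i ∉ gU ∧ mu i ≠ 0
    · have hst' : (pvSelectA user gU mu st i).2 = -1 ∨ 0 < (pvSelectA user gU mu st i).2 := by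
        unfold pvSelectA
        split_ifs with h1 h2 h3 h4 <;> simp_all
        have := hmu i; omega
      rw [List.foldl_cons, List.filter_cons_of_pos (by simpa using hc), List.foldl_cons,
        ih _ hst']
    · have hid : pvSelectA user gU mu st i = st := by
        unfold pvSelectA
        split_ifs with h1 h2 h3 h4 <;> try rfl
        · exfalso; rw [not_or] at h2; exact hc ⟨h2.1, h2.2, h3.1⟩
        · exfalso; rw [not_or] at h2
          have hm0 : mu i = 0 := by
            by_contra hmm; exact hc ⟨h2.1, h2.2, hmm⟩
          rcases hst with h | h <;> omega
      rw [List.foldl_cons, List.filter_cons_of_neg (by simpa using hc), hid]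
      exact ih _ hst

theorem recommend_friends_eq_alt (n : Int) (fs : List (Int × Int)) (user : Int) :
    recommend_friends n fs user = recommend_friends_alt n fs user := by
  simp only [recommend_friends, recommend_friends_alt]
  set G := fs.foldl pvStepGraphA PySem.Dict.empty with hG
  set AD := fs.foldl pvStepAdjB PySem.Dict.empty with hAD
  set gU := G.getD user [] with hgU
  set uf := AD.getD user PySem.Set.empty with huf
  set mutA := fun i => PySem.Set.len ((PySem.Set.ofList gU).inter
      (PySem.Set.ofList (G.getD i []))) with hmutA
  set fofs := uf.foldl (fun acc f => acc ++ (AD.getD f PySem.Set.empty).filter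
      (fun g => decide (¬ g = user ∧ ¬ g ∈ uf))) [] with hfofs
  set cnt := PySem.Dict.counter fofs with hcnt
  -- membership transfer between the two adjacency structures
  have hmem : ∀ x y : Int, y ∈ AD.getD x PySem.Set.empty ↔ y ∈ G.getD x [] := by
    intro x y
    rw [hAD, hG, mem_adjB, mem_graphA, PySem.Dict.getD_empty, PySem.Dict.getD_empty]
    simp [PySem.Set.empty]
  have hsym : ∀ x y : Int, y ∈ G.getD x [] ↔ x ∈ G.getD y [] := by
    intro x y
    rw [hG, mem_graphA, mem_graphA, PySem.Dict.getD_empty]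
    tauto
  have hnd : ∀ f : Int, (AD.getD f PySem.Set.empty).Nodup := by
    intro f
    rw [hAD]
    exact nodup_adjB fs _ (by intro z; simp [PySem.Dict.getD_empty, PySem.Set.empty]) f
  have hufperm : uf.Perm (PySem.Set.ofList gU) := by
    refine (List.perm_ext_iff_of_nodup (hnd user) (PySem.Set.nodup_ofList _)).mpr ?_
    intro a
    rw [PySem.Set.mem_ofList]
    exact hmem user a
  -- A's mutual-friend count as a countP over the friends of user
  have hmutA_countP : ∀ c : Int,
      mutA c = ((PySem.Set.ofList gU).countP (fun f => decide (f ∈ G.getD c []))) := by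
    intro c
    rw [hmutA]
    simp only [PySem.Set.len, PySem.Set.inter, List.countP_eq_length_filter]
    have := List.countP_congr (l := PySem.Set.ofList gU)
      (p := fun x => (PySem.Set.ofList (G.getD c [])).contains x)
      (q := fun f => decide (f ∈ G.getD c []))
      (fun x _ => by simp [PySem.Set.contains_eq_listContains, PySem.Set.mem_ofList])
    rw [List.countP_eq_length_filter, List.countP_eq_length_filter] at this
    rw [this]
  have hmut_nonneg : ∀ i, 0 ≤ mutA i := by
    intro i; rw [hmutA]; simp [PySem.Set.len]
  have hf : fofs = uf.flatMap (fun f => (AD.getD f PySem.Set.empty).filter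
      (fun g => decide (¬ g = user ∧ ¬ g ∈ uf))) := by
    rw [hfofs, PySem.List.foldl_append_eq_flatMap, List.nil_append]
  have hmut_eq : ∀ c : Int, ¬ c = user → c ∉ gU → cnt.getD c 0 = mutA c := by
    intro c hcu hcg
    have hcf : c ∉ uf := fun h => hcg ((hmem user c).mp h)
    rw [hcnt, PySem.Dict.getD_counter, hf, huf]
    rw [count_fof AD user c hnd (AD.getD user PySem.Set.empty) hcu (huf ▸ hcf)]
    rw [hmutA_countP c, ← List.Perm.countP_eq _ hufperm, huf]
    norm_cast
    refine List.countP_congr (fun x _ => ?_)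
    simp only [decide_eq_true_eq]
    rw [hmem, hsym]
  have hpos : ∀ c : Int, mutA c ≠ 0 ↔ ∃ f ∈ uf, c ∈ AD.getD f PySem.Set.empty := by
    intro c
    rw [hmutA_countP c, ← List.Perm.countP_eq _ hufperm, ne_eq, Int.natCast_eq_zero,
      ← ne_eq, ← Nat.pos_iff_ne_zero, List.countP_pos_iff]
    refine exists_congr (fun f => and_congr_right (fun _ => ?_))
    rw [decide_eq_true_eq, hsym c f]
    exact (hmem f c).symm
  have hkeys : ∀ c : Int, c ∈ cnt.keys ↔
      (¬ c = user ∧ c ∉ uf ∧ ∃ f ∈ uf, c ∈ AD.getD f PySem.Set.empty) := by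
    intro c
    rw [hcnt, PySem.Dict.keys_counter, PySem.Set.mem_ofList, hf, List.mem_flatMap]
    simp only [List.mem_filter, decide_eq_true_eq]
    tauto
  -- the sorted candidate list of B is exactly A's ascending scan restricted to candidates
  have hcands : PySem.List.sorted (cnt.keys.filter (fun c => decide (1 ≤ c ∧ c ≤ n))) (fun x => x)
      = (PySem.List.pyRange 1 (n+1)).filter
          (fun i => decide (¬ i = user ∧ i ∉ gU ∧ mutA i ≠ 0)) := by
    apply PySem.List.sorted_eq_of_perm_of_pairwise_lt
    · refine (List.perm_ext_iff_of_nodup ?_ ?_).mpr ?_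
      · exact ((PySem.List.pairwise_lt_pyRange_one 1 (n+1)).filter _).imp (fun h => ne_of_lt h)
      · exact (PySem.Dict.nodup_keys_counter _).filter _
      · intro a
        rw [List.mem_filter, List.mem_filter, PySem.List.mem_pyRange_one, hkeys a]
        simp only [decide_eq_true_eq]
        have h1 : a ∉ uf ↔ a ∉ gU := not_congr (hmem user a)
        have h2 := hpos a
        constructor
        · rintro ⟨⟨ha, hb⟩, hc, hd, he⟩
          exact ⟨⟨hc, h1.mpr hd, h2.mp he⟩, by omega⟩
        · rintro ⟨⟨ha, hb, hc⟩, hd⟩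
          exact ⟨⟨by omega, by omega⟩, ha, h1.mp hb, h2.mpr hc⟩
    · exact (PySem.List.pairwise_lt_pyRange_one 1 (n+1)).filter _
  rw [hcands, foldl_selectA_restrict user gU mutA hmut_nonneg _ _ (Or.inl rfl)]
  congr 1
  apply PySem.List.foldl_congr_mem
  intro acc x hx
  rw [List.mem_filter, decide_eq_true_eq] at hx
  obtain ⟨-, hxu, hxg, hxm⟩ := hx
  have hmx : cnt.getD x 0 = mutA x := hmut_eq x hxu hxg
  unfold pvSelectA pvSelectB
  simp only [hmx]
  by_cases h5 : acc.1.length > 5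
  · rw [if_pos h5, if_pos h5]
  · rw [if_neg h5, if_neg h5, if_neg (by rw [not_or]; exact ⟨hxu, hxg⟩)]
    by_cases hlt : acc.2 < mutA x
    · rw [if_pos ⟨hxm, hlt⟩, if_pos hlt]
    · rw [if_neg (fun h => hlt h.2), if_neg hlt]

-- ===== VERDICT (by name: the statement is the Claim_ definition above) =====
theorem recommend_friends_spec : Claim_equal_recommend_friends := by
  intro n fs user _
  exact recommend_friends_eq_alt n fs user
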